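-- pv_equiv track=rewrite | github.com/ObaidaKhateeb/NLP | hw4/knesset_word2vec_classification.py | split_data_by_speaker
-- ===== SOURCE A (Python) =====
-- def split_data_by_speaker(json_lines, speaker1, speaker2):
--     speaker1_data = []
--     speaker2_data = []
--     speaker1_splitted = speaker1.split()
--     speaker2_splitted = speaker2.split()
--     for line in json_lines:
--         speaker = line['speaker_name']
--         if speaker == speaker1:
--             speaker1_data.append(line)
--         elif speaker == speaker2:
--             speaker2_data.append(line)
--         else:
--             speaker_splitted = speaker.split()
--
--             #the case where the sentence said by one of the two speakers, but one of them is without first name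
--             if (len(speaker_splitted) == 1 or len(speaker1_splitted) == 1) and speaker_splitted[-1] == speaker1_splitted[-1]:
--                 speaker1_data.append(line)
--             elif (len(speaker_splitted) == 1 or len(speaker2_splitted) == 1) and speaker_splitted[-1] == speaker2_splitted[-1]:
--                 speaker2_data.append(line)
--
--             #the case where the sentence said by one of the two speakers, but one of the first names is abbreviated
--             elif len(speaker_splitted) > 1 and len(speaker1_splitted) > 1 and speaker_splitted[0][0] == speaker1_splitted[0][0] and (speaker_splitted[0][1] == "'" or speaker1_splitted[0][1] == "'") and speaker_splitted[-1] == speaker1_splitted[-1]: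
--                 speaker1_data.append(line)
--             elif len(speaker_splitted) > 1 and len(speaker1_splitted) > 1 and speaker_splitted[0][0] == speaker2_splitted[0][0] and (speaker_splitted[0][1] == "'" or speaker2_splitted[0][1] == "'") and speaker_splitted[-1] == speaker2_splitted[-1]:
--                 speaker2_data.append(line)
--
--             #the case where the sentence said by one of the two speakers, but one of the names has middle name
--             elif len(speaker_splitted) > 1 and speaker_splitted[0] == speaker1_splitted[0] and speaker_splitted[-1] == speaker1_splitted[-1]:
--                 speaker1_data.append(line)
--             elif len(speaker_splitted) > 1 and speaker_splitted[0] == speaker2_splitted[0] and speaker_splitted[-1] == speaker2_splitted[-1]: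
--                 speaker2_data.append(line)
--
--             #special case where the one of the two speakers is Reuven Rivlin and its known nickname used as first name
--             elif ((len(speaker_splitted) > 1 and speaker_splitted[0] == 'רובי') or (len(speaker1_splitted) > 1 and speaker1_splitted[0] == 'רובי')) and speaker_splitted[-1] == speaker1_splitted[-1]:
--                 speaker1_data.append(line)
--             elif ((len(speaker_splitted) > 1 and speaker_splitted[0] == 'רובי') or (len(speaker2_splitted) > 1 and speaker2_splitted[0] == 'רובי')) and speaker_splitted[-1] == speaker2_splitted[-1]:
--                 speaker2_data.append(line)
--     return speaker1_data, speaker2_data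
-- ===== SOURCE B (Python) =====
-- # B: table-driven rewrite -- the matching policy becomes a literal list of
-- # (side, predicate) rules scanned generically for the first hit, and the two
-- # output lists are built by two filtering passes instead of one accumulator loop.
-- def _rules(t1, t2, speaker1, speaker2):
--     def exact(target):
--         return lambda speaker, sp: speaker == target
--     def lastname(t):
--         return lambda speaker, sp: (len(sp) == 1 or len(t) == 1) and sp[-1] == t[-1]
--     def abbrev(t):
--         return lambda speaker, sp: len(sp) > 1 and len(t) > 1 and sp[0][0] == t[0][0] and (sp[0][1] == "'" or t[0][1] == "'") and sp[-1] == t[-1]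
--     def middle(t):
--         return lambda speaker, sp: len(sp) > 1 and sp[0] == t[0] and sp[-1] == t[-1]
--     def rubi(t):
--         return lambda speaker, sp: ((len(sp) > 1 and sp[0] == 'רובי') or (len(t) > 1 and t[0] == 'רובי')) and sp[-1] == t[-1]
--     return [(1, exact(speaker1)), (2, exact(speaker2)),
--             (1, lastname(t1)), (2, lastname(t2)),
--             (1, abbrev(t1)), (2, abbrev(t2)),
--             (1, middle(t1)), (2, middle(t2)),
--             (1, rubi(t1)), (2, rubi(t2))]
--
-- def _classify(line, rules):
--     speaker = line['speaker_name']
--     sp = speaker.split()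
--     for side, pred in rules:
--         if pred(speaker, sp):
--             return side
--     return 0
--
-- def split_data_by_speaker(json_lines, speaker1, speaker2):
--     rules = _rules(speaker1.split(), speaker2.split(), speaker1, speaker2)
--     return ([line for line in json_lines if _classify(line, rules) == 1],
--             [line for line in json_lines if _classify(line, rules) == 2])
-- ===== Notes on version B (the rewrite author's own statement) =====
-- stated objective: alternative
-- what changed: B makes the matching policy data: a literal list of (side, predicate) rules in precedence order scanned generically for the first hit, and builds the two outputs by two filtering passes over the lines instead of A's single accumulator loop with eight interleaved elif branches.
-- intended difference: On lines whose speaker abbreviation-matches speaker2 (rule 2) while speaker1's name is at most one token that does not last-name-match the line, A puts the line in neither list because its speaker2 abbreviation branch is mistakenly guarded by speaker1's token count (len(speaker1_splitted) > 1), while B puts it in speaker2_data, the intended fuzzy match. — e.g. on split_data_by_speaker([[("speaker_name", "ac b")]], "x", "a' b"): A returns ([], []), B returns ([], [[("speaker_name", "ac b")]])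
-- outside the precondition, e.g. on split_data_by_speaker([{'speaker_name': 'ab c'}], "a'", 'a c'): A returns ([], []), B raises IndexError; on split_data_by_speaker([{'speaker_name': "a' c"}], 'a cd', 'x y'): A returns ([], []), B returns ([], [])
import Mathlib
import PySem

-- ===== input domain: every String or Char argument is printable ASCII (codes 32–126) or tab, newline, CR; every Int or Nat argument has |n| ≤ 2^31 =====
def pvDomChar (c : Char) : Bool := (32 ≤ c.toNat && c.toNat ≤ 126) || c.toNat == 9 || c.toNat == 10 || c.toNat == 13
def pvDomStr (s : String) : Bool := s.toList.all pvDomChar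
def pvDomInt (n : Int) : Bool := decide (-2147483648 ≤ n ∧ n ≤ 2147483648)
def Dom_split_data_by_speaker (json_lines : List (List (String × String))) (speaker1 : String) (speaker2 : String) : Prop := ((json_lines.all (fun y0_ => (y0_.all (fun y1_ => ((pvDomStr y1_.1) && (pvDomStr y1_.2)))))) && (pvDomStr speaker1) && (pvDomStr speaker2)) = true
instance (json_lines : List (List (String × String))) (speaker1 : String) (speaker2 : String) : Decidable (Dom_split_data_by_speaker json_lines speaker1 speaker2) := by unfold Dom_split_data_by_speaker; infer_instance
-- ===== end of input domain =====

-- B turns A's eight-branch elif cascade into a data-driven rules table scanned for the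
-- first hit, and builds the two outputs by two filtering passes (objective: alternative).

-- Shared small atoms (each is one Python subexpression; Option-guarded exactly where
-- Python indexing can raise — under Pre_ every guard is satisfied, so they are exact).
-- line['speaker_name'] (assoc-list lookup, first match):
def pvLookup (line : List (String × String)) (k : String) : Option String :=
  (line.find? (fun p => p.1 == k)).map (·.2)
-- x[-1] == y[-1]  (false only outside Pre_, where Python raises IndexError):
def pvLastEq (x y : List String) : Bool :=
  (PySem.List.pyGet? x (-1)).isSome && (PySem.List.pyGet? x (-1) == PySem.List.pyGet? y (-1))
-- x[0]:
def pvTok0 (x : List String) : Option String := PySem.List.pyGet? x 0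
-- x[0][j]:
def pvChr (x : List String) (j : Int) : Option Char :=
  (pvTok0 x).bind (fun s => PySem.Str.pyGet? s j)
-- x[0][0] == y[0][0]:
def pvFcEq (x y : List String) : Bool :=
  (pvChr x 0).isSome && (pvChr x 0 == pvChr y 0)
-- x[0][1] == "'" or y[0][1] == "'":
def pvApos (x y : List String) : Bool :=
  (pvChr x 1 == some '\'') || (pvChr y 1 == some '\'')
-- x[0] == y[0]:
def pvTok0Eq (x y : List String) : Bool :=
  (pvTok0 x).isSome && (pvTok0 x == pvTok0 y)
-- (len(x) > 1 and x[0] == 'רובי') or (len(y) > 1 and y[0] == 'רובי'):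
def pvRubi (x y : List String) : Bool :=
  (decide (1 < x.length) && (pvTok0 x == some "רובי")) ||
  (decide (1 < y.length) && (pvTok0 y == some "רובי"))

-- ===== PORT A =====
-- A's loop body: the eight-branch elif chain, transliterated condition for condition.
def pvStepA (t1 t2 : List String) (s1 s2 : String)
    (acc : (List (List (String × String))) × (List (List (String × String))))
    (line : List (String × String)) :
    (List (List (String × String))) × (List (List (String × String))) :=
  match pvLookup line "speaker_name" with
  | none => acc
  | some speaker =>
    if speaker == s1 then (acc.1 ++ [line], acc.2)
    else if speaker == s2 then (acc.1, acc.2 ++ [line])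
    else
      let sp := PySem.Str.split₀ speaker
      if (decide (sp.length = 1) || decide (t1.length = 1)) && pvLastEq sp t1 then (acc.1 ++ [line], acc.2)
      else if (decide (sp.length = 1) || decide (t2.length = 1)) && pvLastEq sp t2 then (acc.1, acc.2 ++ [line])
      else if decide (1 < sp.length) && decide (1 < t1.length) && pvFcEq sp t1 && pvApos sp t1 && pvLastEq sp t1 then (acc.1 ++ [line], acc.2)
      else if decide (1 < sp.length) && decide (1 < t1.length) && pvFcEq sp t2 && pvApos sp t2 && pvLastEq sp t2 then (acc.1, acc.2 ++ [line])
      else if decide (1 < sp.length) && pvTok0Eq sp t1 && pvLastEq sp t1 then (acc.1 ++ [line], acc.2)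
      else if decide (1 < sp.length) && pvTok0Eq sp t2 && pvLastEq sp t2 then (acc.1, acc.2 ++ [line])
      else if pvRubi sp t1 && pvLastEq sp t1 then (acc.1 ++ [line], acc.2)
      else if pvRubi sp t2 && pvLastEq sp t2 then (acc.1, acc.2 ++ [line])
      else acc

def split_data_by_speaker (json_lines : List (List (String × String))) (speaker1 : String) (speaker2 : String) : (List (List (String × String))) × (List (List (String × String))) :=
  let t1 := PySem.Str.split₀ speaker1
  let t2 := PySem.Str.split₀ speaker2
  json_lines.foldl (pvStepA t1 t2 speaker1 speaker2) ([], [])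

-- ===== PORT B =====
-- B's rules table: literal (side, predicate) pairs in precedence order (Source B `_rules`).
def pvRuleList (t1 t2 : List String) (s1 s2 : String) :
    List (Nat × (String → List String → Bool)) :=
  [ (1, fun speaker _ => speaker == s1),
    (2, fun speaker _ => speaker == s2),
    (1, fun _ sp => (decide (sp.length = 1) || decide (t1.length = 1)) && pvLastEq sp t1),
    (2, fun _ sp => (decide (sp.length = 1) || decide (t2.length = 1)) && pvLastEq sp t2),
    (1, fun _ sp => decide (1 < sp.length) && decide (1 < t1.length) && pvFcEq sp t1 && pvApos sp t1 && pvLastEq sp t1),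
    (2, fun _ sp => decide (1 < sp.length) && decide (1 < t2.length) && pvFcEq sp t2 && pvApos sp t2 && pvLastEq sp t2),
    (1, fun _ sp => decide (1 < sp.length) && pvTok0Eq sp t1 && pvLastEq sp t1),
    (2, fun _ sp => decide (1 < sp.length) && pvTok0Eq sp t2 && pvLastEq sp t2),
    (1, fun _ sp => pvRubi sp t1 && pvLastEq sp t1),
    (2, fun _ sp => pvRubi sp t2 && pvLastEq sp t2) ]

-- Source B `_classify`: the side of the first rule whose predicate holds, else 0.
def pvClassify (rules : List (Nat × (String → List String → Bool)))
    (line : List (String × String)) : Nat :=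
  match pvLookup line "speaker_name" with
  | none => 0
  | some speaker =>
    let sp := PySem.Str.split₀ speaker
    ((rules.find? (fun r => r.2 speaker sp)).map (·.1)).getD 0

def split_data_by_speaker_alt (json_lines : List (List (String × String))) (speaker1 : String) (speaker2 : String) : (List (List (String × String))) × (List (List (String × String))) :=
  let rules := pvRuleList (PySem.Str.split₀ speaker1) (PySem.Str.split₀ speaker2) speaker1 speaker2
  (json_lines.filter (fun line => pvClassify rules line == 1),
   json_lines.filter (fun line => pvClassify rules line == 2))

-- ===== PRECONDITION & SPEC =====
-- Pre_ excludes the inputs where the fuzzy-name indexing raises IndexError (a name whose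
-- relevant token list is empty, or a first token without a second character where the
-- abbreviation rule inspects one) in A's chain or in B's rule scan,
-- and the lines without a 'speaker_name' key (KeyError in both).
def pvLineOk (line : List (String × String)) (s1 s2 : String) : Bool :=
  match pvLookup line "speaker_name" with
  | none => false
  | some speaker =>
    (speaker == s1) || (speaker == s2) ||
    (let sp := PySem.Str.split₀ speaker
     let t1 := PySem.Str.split₀ s1
     let t2 := PySem.Str.split₀ s2
     (!((decide (sp.length = 1) || decide (t1.length = 1))) || (!sp.isEmpty && !t1.isEmpty)) &&
     (!((decide (sp.length = 1) || decide (t2.length = 1))) || (!sp.isEmpty && !t2.isEmpty)) &&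
     (!(decide (1 < sp.length)) || (!t1.isEmpty && !t2.isEmpty)) &&
     (!(decide (1 < sp.length) && decide (1 < t1.length) && pvFcEq sp t1) || ((pvChr sp 1).isSome && (pvChr t1 1).isSome)) &&
     (!(decide (1 < sp.length) && decide (1 < t2.length) && pvFcEq sp t2) || ((pvChr sp 1).isSome && (pvChr t2 1).isSome)) &&
     (!(decide (1 < sp.length) && decide (1 < t1.length) && decide (t2.length = 1) && pvFcEq sp t2 && !pvLastEq sp t2) || ((pvChr sp 1).isSome && (pvChr t2 1).isSome)))

def Pre_split_data_by_speaker (json_lines : List (List (String × String))) (speaker1 : String) (speaker2 : String) : Prop :=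
  (json_lines.all (fun l => pvLineOk l speaker1 speaker2)) = true
instance (json_lines : List (List (String × String))) (speaker1 : String) (speaker2 : String) : Decidable (Pre_split_data_by_speaker json_lines speaker1 speaker2) := by unfold Pre_split_data_by_speaker; infer_instance

def pvWitness_split_data_by_speaker : (List (List (String × String))) × String × String :=
  ([[("speaker_name", "x")]], "a", "b")

-- On lines whose speaker abbreviation-matches speaker2 (rule 2) while speaker1's name is a
-- single token that does not last-name-match the line, A returns the line in NEITHER list
-- (its rule-2 branch for speaker2 is mistakenly guarded by speaker1's token count) while B
-- returns it in speaker2's list, which is the intended fuzzy match.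
def pvDiffLine (line : List (String × String)) (s1 s2 : String) : Bool :=
  match (line.find? (fun p => p.1 == "speaker_name")).map (·.2) with
  | none => false
  | some speaker =>
    let sp := PySem.Str.split₀ speaker
    let t1 := PySem.Str.split₀ s1
    let t2 := PySem.Str.split₀ s2
    let sp0 := (sp.head?.getD "").toList
    let t20 := (t2.head?.getD "").toList
    !(speaker == s1) && !(speaker == s2) &&
    !(decide (1 < t1.length)) && decide (1 < t2.length) && decide (1 < sp.length) &&
    !(sp.getLast?.isSome && sp.getLast? == t1.getLast?) &&
    (sp0.head?.isSome && sp0.head? == t20.head?) &&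
    ((sp0[1]? == some '\'') || (t20[1]? == some '\'')) &&
    (sp.getLast?.isSome && sp.getLast? == t2.getLast?) &&
    !(sp.head?.isSome && sp.head? == t2.head?) &&
    !(sp.head? == some "רובי") && !(t2.head? == some "רובי")

def D_split_data_by_speaker (json_lines : List (List (String × String))) (speaker1 : String) (speaker2 : String) : Prop :=
  (json_lines.any (fun l => pvDiffLine l speaker1 speaker2)) = true
instance (json_lines : List (List (String × String))) (speaker1 : String) (speaker2 : String) : Decidable (D_split_data_by_speaker json_lines speaker1 speaker2) := by unfold D_split_data_by_speaker; infer_instance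

def Spec_split_data_by_speaker (json_lines : List (List (String × String))) (speaker1 : String) (speaker2 : String) (out : (List (List (String × String))) × (List (List (String × String)))) : Prop := ¬ D_split_data_by_speaker json_lines speaker1 speaker2 → out = split_data_by_speaker_alt json_lines speaker1 speaker2
instance (json_lines : List (List (String × String))) (speaker1 : String) (speaker2 : String) (out : (List (List (String × String))) × (List (List (String × String)))) : Decidable (Spec_split_data_by_speaker json_lines speaker1 speaker2 out) := by unfold Spec_split_data_by_speaker; infer_instance

def pvDiffWitness_split_data_by_speaker : (List (List (String × String))) × String × String :=
  ([[("speaker_name", "ac b")]], "x", "a' b")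
def pvDiffWitnessOut_split_data_by_speaker : ((List (List (String × String))) × (List (List (String × String)))) × ((List (List (String × String))) × (List (List (String × String)))) :=
  (([], []), ([], [[("speaker_name", "ac b")]]))

-- ===== CLAIM (what is proved, stated in full; the proofs are below) =====
def Claim_unchanged_split_data_by_speaker : Prop := ∀ (json_lines : List (List (String × String))) (speaker1 : String) (speaker2 : String), Dom_split_data_by_speaker json_lines speaker1 speaker2 → Pre_split_data_by_speaker json_lines speaker1 speaker2 → Spec_split_data_by_speaker json_lines speaker1 speaker2 (split_data_by_speaker json_lines speaker1 speaker2)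
def Claim_changed_split_data_by_speaker : Prop := Dom_split_data_by_speaker (pvDiffWitness_split_data_by_speaker.1) (pvDiffWitness_split_data_by_speaker.2.1) (pvDiffWitness_split_data_by_speaker.2.2) ∧ Pre_split_data_by_speaker (pvDiffWitness_split_data_by_speaker.1) (pvDiffWitness_split_data_by_speaker.2.1) (pvDiffWitness_split_data_by_speaker.2.2) ∧ D_split_data_by_speaker (pvDiffWitness_split_data_by_speaker.1) (pvDiffWitness_split_data_by_speaker.2.1) (pvDiffWitness_split_data_by_speaker.2.2) ∧ split_data_by_speaker (pvDiffWitness_split_data_by_speaker.1) (pvDiffWitness_split_data_by_speaker.2.1) (pvDiffWitness_split_data_by_speaker.2.2) = pvDiffWitnessOut_split_data_by_speaker.1 ∧ split_data_by_speaker_alt (pvDiffWitness_split_data_by_speaker.1) (pvDiffWitness_split_data_by_speaker.2.1) (pvDiffWitness_split_data_by_speaker.2.2) = pvDiffWitnessOut_split_data_by_speaker.2 ∧ pvDiffWitnessOut_split_data_by_speaker.1 ≠ pvDiffWitnessOut_split_data_by_speaker.2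

def Claim_exact_split_data_by_speaker : Prop := ∀ (json_lines : List (List (String × String))) (speaker1 : String) (speaker2 : String), Dom_split_data_by_speaker json_lines speaker1 speaker2 → Pre_split_data_by_speaker json_lines speaker1 speaker2 → D_split_data_by_speaker json_lines speaker1 speaker2 → split_data_by_speaker json_lines speaker1 speaker2 ≠ split_data_by_speaker_alt json_lines speaker1 speaker2

-- ===== LEMMAS AND PROOFS =====

-- Selector abstraction: 1 = append to speaker1_data, 2 = append to speaker2_data, 0 = drop.
def pvApply (sel : Nat)
    (acc : (List (List (String × String))) × (List (List (String × String))))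
    (line : List (String × String)) :
    (List (List (String × String))) × (List (List (String × String))) :=
  if sel = 1 then (acc.1 ++ [line], acc.2) else if sel = 2 then (acc.1, acc.2 ++ [line]) else acc

def pvSelA (sp1 spG t11 t1G t21 t2G la1 la2 fc1 fc2 ap1 ap2 te1 te2 rb1 rb2 : Bool) : Nat :=
  if (sp1 || t11) && la1 then 1
  else if (sp1 || t21) && la2 then 2
  else if spG && t1G && fc1 && ap1 && la1 then 1
  else if spG && t1G && fc2 && ap2 && la2 then 2
  else if spG && te1 && la1 then 1
  else if spG && te2 && la2 then 2
  else if rb1 && la1 then 1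
  else if rb2 && la2 then 2
  else 0

-- B's rule chain (the fixed guard t2G in the speaker2 abbreviation rule), as a selector.
def pvSelF (sp1 spG t11 t1G t21 t2G la1 la2 fc1 fc2 ap1 ap2 te1 te2 rb1 rb2 : Bool) : Nat :=
  if (sp1 || t11) && la1 then 1
  else if (sp1 || t21) && la2 then 2
  else if spG && t1G && fc1 && ap1 && la1 then 1
  else if spG && t2G && fc2 && ap2 && la2 then 2
  else if spG && te1 && la1 then 1
  else if spG && te2 && la2 then 2
  else if rb1 && la1 then 1
  else if rb2 && la2 then 2
  else 0

def pvCon (sp1 spG t11 t1G t21 t2G la1 la2 fc1 fc2 ap2 te1 te2 rbs rb2t : Bool) : Bool :=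
  !(sp1 && spG) && !(t11 && t1G) && !(t21 && t2G) &&
  (!la1 || (sp1 || spG)) && (!la1 || (t11 || t1G)) &&
  (!la2 || (sp1 || spG)) && (!la2 || (t21 || t2G)) &&
  (!fc1 || (sp1 || spG)) && (!fc1 || (t11 || t1G)) &&
  (!fc2 || (sp1 || spG)) && (!fc2 || (t21 || t2G)) &&
  (!te1 || (sp1 || spG)) && (!te1 || (t11 || t1G)) &&
  (!te2 || (sp1 || spG)) && (!te2 || (t21 || t2G)) &&
  !(!t1G && t2G && spG && !la1 && fc2 && ap2 && la2 && !te2 && !rbs && !rb2t)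

theorem pvChainRw (sp1 spG t11 t1G t21 t2G la1 la2 fc1 fc2 ap1 ap2 te1 te2 rb1 rb2 : Bool)
    (h : (spG && t1G && fc2 && ap2 && la2) = (spG && t2G && fc2 && ap2 && la2)) :
    pvSelA sp1 spG t11 t1G t21 t2G la1 la2 fc1 fc2 ap1 ap2 te1 te2 rb1 rb2
      = pvSelF sp1 spG t11 t1G t21 t2G la1 la2 fc1 fc2 ap1 ap2 te1 te2 rb1 rb2 := by
  unfold pvSelA pvSelF
  rw [h]

theorem pvOrbResolve {a b : Bool} (h : (!a || b) = true) (ha : a = true) : b = true := by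
  subst ha; simpa using h

theorem pvNotandResolve {a b : Bool} (h : (!(a && b)) = true) (hb : b = true) : a = false := by
  subst hb; cases a <;> simp_all

theorem pvSel_eq : ∀ (sp1 spG t11 t1G t21 t2G la1 la2 fc1 fc2 ap1 ap2 te1 te2 rbs rb1t rb2t : Bool),
    pvCon sp1 spG t11 t1G t21 t2G la1 la2 fc1 fc2 ap2 te1 te2 rbs rb2t = true →
    pvSelA sp1 spG t11 t1G t21 t2G la1 la2 fc1 fc2 ap1 ap2 te1 te2 ((spG && rbs) || (t1G && rb1t)) ((spG && rbs) || (t2G && rb2t))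
      = pvSelF sp1 spG t11 t1G t21 t2G la1 la2 fc1 fc2 ap1 ap2 te1 te2 ((spG && rbs) || (t1G && rb1t)) ((spG && rbs) || (t2G && rb2t)) := by
  intro sp1 spG t11 t1G t21 t2G la1 la2 fc1 fc2 ap1 ap2 te1 te2 rbs rb1t rb2t h
  simp only [pvCon, Bool.and_eq_true, and_assoc] at h
  obtain ⟨hc1, hc2, hc3, hc4, hc5, hc6, hc7, hc8, hc9, hc10, hc11, hc12, hc13, hc14, hc15, hc16⟩ := h
  cases hla2 : la2 with
  | false => apply pvChainRw; simp [hla2]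
  | true =>
    cases hspG : spG with
    | false => apply pvChainRw; simp [hspG]
    | true =>
      cases ht2 : t2G with
      | false =>
        have ht21 : t21 = true := by
          have h' := pvOrbResolve hc7 hla2
          rw [ht2] at h'
          simpa using h'
        simp [pvSelA, pvSelF, hla2, ht21]
      | true =>
        cases ht1 : t1G with
        | true => apply pvChainRw; rfl
        | false =>
          cases hla1 : la1 with
          | true =>
            have ht11 : t11 = true := by
              have h' := pvOrbResolve hc5 hla1
              rw [ht1] at h'
              simpa using h'
            simp [pvSelA, pvSelF, hla1, ht11]
          | false =>
            cases hfc2 : fc2 with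
            | false => apply pvChainRw; simp [ht1, hfc2]
            | true =>
              cases hap2 : ap2 with
              | false => apply pvChainRw; simp [ht1, hap2]
              | true =>
                have hkey : te2 = true ∨ rbs = true ∨ rb2t = true := by
                  rw [ht1, ht2, hspG, hla1, hfc2, hap2, hla2] at hc16
                  revert hc16
                  cases te2 <;> cases rbs <;> cases rb2t <;> simp
                rcases hkey with h' | h' | h' <;>
                  simp [pvSelA, pvSelF, hla1, hla2, hspG, ht1, ht2, hfc2, hap2, h']

def pvConD (sp1 spG t11 t1G t21 t2G la1 la2 fc2 ap2 te2 rbs rb2t : Bool) : Bool :=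
  !(sp1 && spG) && !(t11 && t1G) && !(t21 && t2G) &&
  !t1G && t2G && spG && !la1 && fc2 && ap2 && la2 && !te2 && !rbs && !rb2t

theorem pvSelDiff : ∀ (sp1 spG t11 t1G t21 t2G la1 la2 fc1 fc2 ap1 ap2 te1 te2 rbs rb1t rb2t : Bool),
    pvConD sp1 spG t11 t1G t21 t2G la1 la2 fc2 ap2 te2 rbs rb2t = true →
    pvSelA sp1 spG t11 t1G t21 t2G la1 la2 fc1 fc2 ap1 ap2 te1 te2 ((spG && rbs) || (t1G && rb1t)) ((spG && rbs) || (t2G && rb2t)) = 0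
    ∧ pvSelF sp1 spG t11 t1G t21 t2G la1 la2 fc1 fc2 ap1 ap2 te1 te2 ((spG && rbs) || (t1G && rb1t)) ((spG && rbs) || (t2G && rb2t)) = 2 := by
  intro sp1 spG t11 t1G t21 t2G la1 la2 fc1 fc2 ap1 ap2 te1 te2 rbs rb1t rb2t h
  simp only [pvConD, Bool.and_eq_true, and_assoc] at h
  obtain ⟨hn1, hn2, hn3, ht1, ht2, hspG, hla1, hfc2, hap2, hla2, hte2, hrbs, hrb2t⟩ := h
  have ht1' : t1G = false := by simpa using ht1
  have hla1' : la1 = false := by simpa using hla1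
  have hte2' : te2 = false := by simpa using hte2
  have hrbs' : rbs = false := by simpa using hrbs
  have hrb2t' : rb2t = false := by simpa using hrb2t
  have hsp1 : sp1 = false := pvNotandResolve hn1 hspG
  have ht21 : t21 = false := pvNotandResolve hn3 ht2
  constructor <;>
    simp [pvSelA, pvSelF, ht1', hla1', hte2', hrbs', hrb2t', hsp1, ht21, ht2, hspG, hfc2, hap2, hla2]
theorem imp_orb {a b : Bool} (h : a = true → b = true) : (!a || b) = true := by
  cases a
  · rfl
  · simp [h rfl]

theorem pvLenPair (n : Nat) : (!(decide (n = 1) && decide (1 < n))) = true := by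
  by_cases h : n = 1
  · subst h; simp
  · simp [h]

theorem pvApplyA (b1 b2 b3 b4 b5 b6 b7 b8 : Bool)
    (acc : (List (List (String × String))) × (List (List (String × String))))
    (line : List (String × String)) :
    (if b1 then (acc.1 ++ [line], acc.2) else if b2 then (acc.1, acc.2 ++ [line])
     else if b3 then (acc.1 ++ [line], acc.2) else if b4 then (acc.1, acc.2 ++ [line])
     else if b5 then (acc.1 ++ [line], acc.2) else if b6 then (acc.1, acc.2 ++ [line])
     else if b7 then (acc.1 ++ [line], acc.2) else if b8 then (acc.1, acc.2 ++ [line])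
     else acc)
      = pvApply (if b1 then 1 else if b2 then 2 else if b3 then 1 else if b4 then 2
                 else if b5 then 1 else if b6 then 2 else if b7 then 1 else if b8 then 2 else 0) acc line := by
  split_ifs <;> rfl

-- nonemptiness facts about the atoms
theorem pvLastEq_ne {x y : List String} (h : pvLastEq x y = true) : x ≠ [] ∧ y ≠ [] := by
  unfold pvLastEq at h
  cases hx : PySem.List.pyGet? x (-1) with
  | none => rw [hx] at h; simp at h
  | some a =>
    rw [hx] at h
    simp only [Bool.and_eq_true, beq_iff_eq] at h
    refine ⟨?_, ?_⟩
    · intro he; subst he; simp [PySem.List.pyGet?] at hx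
    · intro he; subst he; rw [show PySem.List.pyGet? ([] : List String) (-1) = none by rfl] at h
      simp at h

theorem pvTok0_ne {x : List String} {a : String} (h : pvTok0 x = some a) : x ≠ [] := by
  intro he; subst he; simp [pvTok0, PySem.List.pyGet?] at h

theorem pvTok0Eq_ne {x y : List String} (h : pvTok0Eq x y = true) : x ≠ [] ∧ y ≠ [] := by
  unfold pvTok0Eq at h
  cases hx : pvTok0 x with
  | none => rw [hx] at h; simp at h
  | some a =>
    rw [hx] at h
    simp only [Bool.and_eq_true, beq_iff_eq] at h
    exact ⟨pvTok0_ne hx, pvTok0_ne h.2.symm⟩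

theorem pvChr_ne {x : List String} {j : Int} {c : Char} (h : pvChr x j = some c) : x ≠ [] := by
  unfold pvChr at h
  cases hx : pvTok0 x with
  | none => rw [hx] at h; simp at h
  | some s => exact pvTok0_ne hx

theorem pvFcEq_ne {x y : List String} (h : pvFcEq x y = true) : x ≠ [] ∧ y ≠ [] := by
  unfold pvFcEq at h
  cases hx : pvChr x 0 with
  | none => rw [hx] at h; simp at h
  | some a =>
    rw [hx] at h
    simp only [Bool.and_eq_true, beq_iff_eq] at h
    exact ⟨pvChr_ne hx, pvChr_ne h.2.symm⟩

theorem pvLen_bool {x : List String} (h : x ≠ []) :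
    (decide (x.length = 1) || decide (1 < x.length)) = true := by
  cases x with
  | nil => exact absurd rfl h
  | cons a l => simp only [List.length_cons, Bool.or_eq_true, decide_eq_true_eq]; omega

-- bridge: the stdlib phrasing used by D_ equals the ports' atoms
theorem pvLastEq_eq (x y : List String) :
    (x.getLast?.isSome && x.getLast? == y.getLast?) = pvLastEq x y := by
  unfold pvLastEq; simp only [PySem.List.pyGet?_neg_one]

theorem pvTok0_eq (x : List String) : x.head? = pvTok0 x := by
  unfold pvTok0; rw [PySem.List.pyGet?_zero]; cases x <;> simp

theorem pvChr0_eq (x : List String) : (x.head?.getD "").toList.head? = pvChr x 0 := by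
  unfold pvChr; rw [← pvTok0_eq]
  cases hx : x.head? with
  | none => simp
  | some s => simp [pysem]; generalize s.toList = cs; cases cs <;> rfl

theorem pvChr1_eq (x : List String) : (x.head?.getD "").toList[1]? = pvChr x 1 := by
  unfold pvChr; rw [← pvTok0_eq]
  cases hx : x.head? with
  | none => simp
  | some s => simp [pysem]

theorem pvFcEq_eq (x y : List String) :
    ((x.head?.getD "").toList.head?.isSome && ((x.head?.getD "").toList.head? == (y.head?.getD "").toList.head?)) = pvFcEq x y := by
  rw [pvChr0_eq, pvChr0_eq]; rfl

theorem pvApos_eq (x y : List String) :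
    (((x.head?.getD "").toList[1]? == some '\'') || ((y.head?.getD "").toList[1]? == some '\'')) = pvApos x y := by
  rw [pvChr1_eq, pvChr1_eq]; rfl

theorem pvTok0Eq_eq (x y : List String) :
    (x.head?.isSome && x.head? == y.head?) = pvTok0Eq x y := by
  rw [pvTok0_eq, pvTok0_eq]; rfl

-- selector form of each port's per-line decision
def pvSelLineA (line : List (String × String)) (s1 s2 : String) : Nat :=
  match pvLookup line "speaker_name" with
  | none => 0
  | some speaker =>
    if speaker == s1 then 1
    else if speaker == s2 then 2
    else
      let sp := PySem.Str.split₀ speaker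
      let t1 := PySem.Str.split₀ s1
      let t2 := PySem.Str.split₀ s2
      pvSelA (decide (sp.length = 1)) (decide (1 < sp.length)) (decide (t1.length = 1)) (decide (1 < t1.length)) (decide (t2.length = 1)) (decide (1 < t2.length)) (pvLastEq sp t1) (pvLastEq sp t2) (pvFcEq sp t1) (pvFcEq sp t2) (pvApos sp t1) (pvApos sp t2) (pvTok0Eq sp t1) (pvTok0Eq sp t2) (pvRubi sp t1) (pvRubi sp t2)

def pvSelLineB (line : List (String × String)) (s1 s2 : String) : Nat :=
  match pvLookup line "speaker_name" with
  | none => 0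
  | some speaker =>
    if speaker == s1 then 1
    else if speaker == s2 then 2
    else
      let sp := PySem.Str.split₀ speaker
      let t1 := PySem.Str.split₀ s1
      let t2 := PySem.Str.split₀ s2
      pvSelF (decide (sp.length = 1)) (decide (1 < sp.length)) (decide (t1.length = 1)) (decide (1 < t1.length)) (decide (t2.length = 1)) (decide (1 < t2.length)) (pvLastEq sp t1) (pvLastEq sp t2) (pvFcEq sp t1) (pvFcEq sp t2) (pvApos sp t1) (pvApos sp t2) (pvTok0Eq sp t1) (pvTok0Eq sp t2) (pvRubi sp t1) (pvRubi sp t2)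

theorem pvStepA_apply (s1 s2 : String) (line : List (String × String))
    (acc : (List (List (String × String))) × (List (List (String × String)))) :
    pvStepA (PySem.Str.split₀ s1) (PySem.Str.split₀ s2) s1 s2 acc line
      = pvApply (pvSelLineA line s1 s2) acc line := by
  unfold pvStepA pvSelLineA
  cases hl : pvLookup line "speaker_name" with
  | none => rfl
  | some speaker =>
    simp only
    rcases Bool.eq_false_or_eq_true (speaker == s1) with h1 | h1
    · simp [h1, pvApply]
    · rcases Bool.eq_false_or_eq_true (speaker == s2) with h2 | h2
      · simp [h1, h2, pvApply]
      · simp only [h1, h2, Bool.false_eq_true, if_false]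
        exact pvApplyA _ _ _ _ _ _ _ _ acc line

-- one step of the generic first-hit scan over a (side, predicate) rules list
theorem pvFindSide_cons (speaker : String) (sp : List String) (v : Nat)
    (a : String → List String → Bool) (rest : List (Nat × (String → List String → Bool))) :
    ((((v, a) :: rest).find? (fun r => r.2 speaker sp)).map (·.1)).getD 0
      = if a speaker sp then v
        else ((rest.find? (fun r => r.2 speaker sp)).map (·.1)).getD 0 := by
  cases h : a speaker sp <;> simp [List.find?, h]

theorem pvFindSide_nil (speaker : String) (sp : List String) :
    ((([] : List (Nat × (String → List String → Bool))).find? (fun r => r.2 speaker sp)).map (·.1)).getD 0 = 0 := rfl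

-- B's generic first-hit rule scan computes exactly the fixed selector chain.
theorem pvClassify_selB (s1 s2 : String) (line : List (String × String)) :
    pvClassify (pvRuleList (PySem.Str.split₀ s1) (PySem.Str.split₀ s2) s1 s2) line
      = pvSelLineB line s1 s2 := by
  unfold pvClassify pvSelLineB pvRuleList
  cases hl : pvLookup line "speaker_name" with
  | none => rfl
  | some speaker =>
    simp only [pvFindSide_cons, pvFindSide_nil, pvSelF]

theorem pvApply_len2 (sel : Nat)
    (acc : (List (List (String × String))) × (List (List (String × String))))
    (line : List (String × String)) :
    (pvApply sel acc line).2.length = acc.2.length + (if sel = 2 then 1 else 0) := by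
  unfold pvApply
  split_ifs <;> simp_all

theorem pvFoldA_apply (s1 s2 : String) (jl : List (List (String × String))) :
    ∀ acc, jl.foldl (pvStepA (PySem.Str.split₀ s1) (PySem.Str.split₀ s2) s1 s2) acc
      = jl.foldl (fun a l => pvApply (pvSelLineA l s1 s2) a l) acc := by
  induction jl with
  | nil => intro acc; rfl
  | cons hd tl ih =>
    intro acc
    simp only [List.foldl_cons]
    rw [pvStepA_apply]
    exact ih _

-- the accumulator loop over a selector equals the two filtering passes
theorem pvFold_apply_filter (f : List (String × String) → Nat)
    (jl : List (List (String × String))) :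
    ∀ acc, jl.foldl (fun a l => pvApply (f l) a l) acc
      = (acc.1 ++ jl.filter (fun l => f l == 1), acc.2 ++ jl.filter (fun l => f l == 2)) := by
  induction jl with
  | nil => intro acc; simp
  | cons hd tl ih =>
    intro acc
    simp only [List.foldl_cons, List.filter_cons]
    rw [ih]
    unfold pvApply
    by_cases h1 : f hd = 1
    · simp [h1]
    · by_cases h2 : f hd = 2
      · simp [h1, h2]
      · simp [h1, h2]

-- A's selector equals B's selector on every line outside the change region
set_option maxHeartbeats 2000000 in
theorem pvSelLine_eq (s1 s2 : String) (line : List (String × String))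
    (hnd : pvDiffLine line s1 s2 = false) :
    pvSelLineA line s1 s2 = pvSelLineB line s1 s2 := by
  unfold pvSelLineA pvSelLineB
  unfold pvDiffLine at hnd
  cases hl : pvLookup line "speaker_name" with
  | none => rfl
  | some speaker =>
    have hl' : (line.find? (fun p => p.1 == "speaker_name")).map (·.2) = pvLookup line "speaker_name" := rfl
    rw [hl] at hl'
    simp only [hl', hl] at hnd ⊢
    rcases Bool.eq_false_or_eq_true (speaker == s1) with h1 | h1
    · simp [h1]
    · rcases Bool.eq_false_or_eq_true (speaker == s2) with h2 | h2
      · simp [h1, h2]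
      · simp only [h1, h2, Bool.not_false, Bool.true_and, Bool.false_eq_true, if_false] at hnd ⊢
        set sp := PySem.Str.split₀ speaker with hsp
        set t1 := PySem.Str.split₀ s1 with ht1
        set t2 := PySem.Str.split₀ s2 with ht2
        rw [show pvRubi sp t1 = ((decide (1 < sp.length) && (pvTok0 sp == some "רובי")) || (decide (1 < t1.length) && (pvTok0 t1 == some "רובי"))) from rfl]
        rw [show pvRubi sp t2 = ((decide (1 < sp.length) && (pvTok0 sp == some "רובי")) || (decide (1 < t2.length) && (pvTok0 t2 == some "רובי"))) from rfl]
        apply pvSel_eq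
        simp only [pvCon, Bool.and_eq_true, and_assoc]
        refine ⟨?_, ?_, ?_, ?_, ?_, ?_, ?_, ?_, ?_, ?_, ?_, ?_, ?_, ?_, ?_, ?_⟩
        · exact pvLenPair sp.length
        · exact pvLenPair t1.length
        · exact pvLenPair t2.length
        · exact imp_orb (fun h => pvLen_bool (pvLastEq_ne h).1)
        · exact imp_orb (fun h => pvLen_bool (pvLastEq_ne h).2)
        · exact imp_orb (fun h => pvLen_bool (pvLastEq_ne h).1)
        · exact imp_orb (fun h => pvLen_bool (pvLastEq_ne h).2)
        · exact imp_orb (fun h => pvLen_bool (pvFcEq_ne h).1)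
        · exact imp_orb (fun h => pvLen_bool (pvFcEq_ne h).2)
        · exact imp_orb (fun h => pvLen_bool (pvFcEq_ne h).1)
        · exact imp_orb (fun h => pvLen_bool (pvFcEq_ne h).2)
        · exact imp_orb (fun h => pvLen_bool (pvTok0Eq_ne h).1)
        · exact imp_orb (fun h => pvLen_bool (pvTok0Eq_ne h).2)
        · exact imp_orb (fun h => pvLen_bool (pvTok0Eq_ne h).1)
        · exact imp_orb (fun h => pvLen_bool (pvTok0Eq_ne h).2)
        · simp only [pvLastEq_eq, pvFcEq_eq, pvApos_eq, pvTok0Eq_eq] at hnd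
          simp only [pvTok0_eq] at hnd
          rw [hnd]; rfl

-- inside the change region the selectors are 0 (A drops the line) and 2 (B keeps it for speaker2)
set_option maxHeartbeats 2000000 in
theorem pvSelLine_diff (s1 s2 : String) (line : List (String × String))
    (hd : pvDiffLine line s1 s2 = true) :
    pvSelLineA line s1 s2 = 0 ∧ pvSelLineB line s1 s2 = 2 := by
  unfold pvSelLineA pvSelLineB
  unfold pvDiffLine at hd
  cases hl : pvLookup line "speaker_name" with
  | none =>
    have hl' : (line.find? (fun p => p.1 == "speaker_name")).map (·.2) = pvLookup line "speaker_name" := rfl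
    rw [hl] at hl'
    rw [hl'] at hd
    simp at hd
  | some speaker =>
    have hl' : (line.find? (fun p => p.1 == "speaker_name")).map (·.2) = pvLookup line "speaker_name" := rfl
    rw [hl] at hl'
    simp only [hl', hl] at hd ⊢
    set sp := PySem.Str.split₀ speaker with hsp
    set t1 := PySem.Str.split₀ s1 with ht1
    set t2 := PySem.Str.split₀ s2 with ht2
    simp only [pvLastEq_eq, pvFcEq_eq, pvApos_eq, pvTok0Eq_eq] at hd
    simp only [pvTok0_eq] at hd
    simp only [Bool.and_eq_true, and_assoc] at hd
    obtain ⟨he1, he2, h3, h4, h5, h6, h7, h8, h9, h10, h11, h12⟩ := hd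
    rw [Bool.not_eq_true'] at he1 he2
    simp only [he1, he2, Bool.false_eq_true, if_false]
    rw [show pvRubi sp t1 = ((decide (1 < sp.length) && (pvTok0 sp == some "רובי")) || (decide (1 < t1.length) && (pvTok0 t1 == some "רובי"))) from rfl]
    rw [show pvRubi sp t2 = ((decide (1 < sp.length) && (pvTok0 sp == some "רובי")) || (decide (1 < t2.length) && (pvTok0 t2 == some "רובי"))) from rfl]
    apply pvSelDiff
    simp only [pvConD, Bool.and_eq_true, and_assoc]
    exact ⟨pvLenPair sp.length, pvLenPair t1.length, pvLenPair t2.length, h3, h4, h5, h6, h7, h8, h9, h10, h11, h12⟩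

-- the alt port written through the B selector
theorem pvAlt_filter (jl : List (List (String × String))) (s1 s2 : String) :
    split_data_by_speaker_alt jl s1 s2
      = (jl.filter (fun l => pvSelLineB l s1 s2 == 1), jl.filter (fun l => pvSelLineB l s1 s2 == 2)) := by
  unfold split_data_by_speaker_alt
  simp only
  rw [show (fun line => pvClassify (pvRuleList (PySem.Str.split₀ s1) (PySem.Str.split₀ s2) s1 s2) line == 1)
        = (fun l => pvSelLineB l s1 s2 == 1) from funext (fun l => by rw [pvClassify_selB]),
      show (fun line => pvClassify (pvRuleList (PySem.Str.split₀ s1) (PySem.Str.split₀ s2) s1 s2) line == 2)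
        = (fun l => pvSelLineB l s1 s2 == 2) from funext (fun l => by rw [pvClassify_selB])]

theorem pvFold_apply_len2 (sel : List (String × String) → Nat) (jl : List (List (String × String))) :
    ∀ acc, ((jl.foldl (fun a l => pvApply (sel l) a l) acc).2.length)
      = acc.2.length + jl.countP (fun l => decide (sel l = 2)) := by
  induction jl with
  | nil => intro acc; simp
  | cons hd tl ih =>
    intro acc
    simp only [List.foldl_cons, List.countP_cons]
    rw [ih, pvApply_len2]
    by_cases h : sel hd = 2 <;> simp [h] <;> omega

theorem pvCountP_lt {α : Type} (p q : α → Bool) :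
    ∀ (l : List α) (x : α), x ∈ l → (∀ a ∈ l, p a = true → q a = true) →
      p x = false → q x = true → l.countP p < l.countP q := by
  intro l
  induction l with
  | nil => intro x hx; cases hx
  | cons a t ih =>
    intro x hx hall hpx hqx
    simp only [List.countP_cons]
    rcases List.mem_cons.mp hx with rfl | hxt
    · have hle : t.countP p ≤ t.countP q :=
        List.countP_mono_left (fun b hb hpb => hall b (List.mem_cons_of_mem _ hb) hpb)
      simp [hpx, hqx]
      omega
    · have hlt := ih x hxt (fun b hb => hall b (List.mem_cons_of_mem _ hb)) hpx hqx
      by_cases hpa : p a = true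
      · have hqa := hall a List.mem_cons_self hpa
        simp [hpa, hqa]
        omega
      · rw [Bool.not_eq_true] at hpa
        cases hqa : q a <;> simp [hpa, hqa] <;> omega


-- ===== VERDICT (by name: the statement is the Claim_ definition above) =====
theorem split_data_by_speaker_spec : Claim_unchanged_split_data_by_speaker := by
  intro jl s1 s2 _hdom _hpre
  unfold Spec_split_data_by_speaker
  intro hnd
  have hln : ∀ l ∈ jl, pvDiffLine l s1 s2 = false := by
    intro l hm
    by_contra hc
    exact hnd (List.any_eq_true.mpr ⟨l, hm, by simpa using hc⟩)
  unfold split_data_by_speaker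
  rw [pvAlt_filter]
  simp only
  rw [pvFoldA_apply s1 s2 jl ([], []), pvFold_apply_filter (fun l => pvSelLineA l s1 s2) jl ([], [])]
  simp only [List.nil_append]
  have h1 : jl.filter (fun l => pvSelLineA l s1 s2 == 1) = jl.filter (fun l => pvSelLineB l s1 s2 == 1) :=
    List.filter_congr (fun l hm => by rw [pvSelLine_eq s1 s2 l (hln l hm)])
  have h2 : jl.filter (fun l => pvSelLineA l s1 s2 == 2) = jl.filter (fun l => pvSelLineB l s1 s2 == 2) :=
    List.filter_congr (fun l hm => by rw [pvSelLine_eq s1 s2 l (hln l hm)])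
  rw [h1, h2]

theorem split_data_by_speaker_changed : Claim_changed_split_data_by_speaker := by
  unfold Claim_changed_split_data_by_speaker; decide

theorem split_data_by_speaker_tight : Claim_exact_split_data_by_speaker := by
  intro jl s1 s2 _hdom _hpre hD heq
  unfold D_split_data_by_speaker at hD
  obtain ⟨x, hxmem, hxd⟩ := List.any_eq_true.mp hD
  have hx0 := pvSelLine_diff s1 s2 x (by simpa using hxd)
  have hlen := congrArg (fun r => r.2.length) heq
  unfold split_data_by_speaker at hlen
  rw [pvAlt_filter] at hlen
  simp only at hlen
  rw [pvFoldA_apply s1 s2 jl ([], [])] at hlen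
  rw [pvFold_apply_len2 (fun l => pvSelLineA l s1 s2) jl ([], [])] at hlen
  rw [← List.countP_eq_length_filter] at hlen
  have hlt : jl.countP (fun l => decide (pvSelLineA l s1 s2 = 2))
      < jl.countP (fun l => pvSelLineB l s1 s2 == 2) := by
    apply pvCountP_lt _ _ jl x hxmem
    · intro a ha hp
      by_cases hd : pvDiffLine a s1 s2 = true
      · have h0 := (pvSelLine_diff s1 s2 a hd).1
        simp [h0] at hp
      · rw [Bool.not_eq_true] at hd
        rw [decide_eq_true_eq] at hp
        simp only [beq_iff_eq]
        rw [← pvSelLine_eq s1 s2 a hd]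
        exact hp
    · simp [hx0.1]
    · simp [hx0.2]
  have hlen' : List.countP (fun l => decide (pvSelLineA l s1 s2 = 2)) jl
      = List.countP (fun l => pvSelLineB l s1 s2 == 2) jl := by simpa using hlen
  omega
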